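-- pv_equiv track=rewrite | github.com/limdin25/engageflow | backend/automation/engine.py | _infer_log_module_action
-- ===== SOURCE A (Python) =====
-- from typing import Any, Callable, Dict, List, Optional, Set, Tuple
--
-- def _infer_log_module_action(message: str) -> Tuple[str, str]:
--     text = str(message or "").strip()
--     lower = text.lower()
--
--     if "proxy" in lower:
--         if "check" in lower or "passed" in lower or "retry" in lower or "failed" in lower:
--             return "proxy", "check"
--         return "proxy", "event"
--
--     if any(token in lower for token in ("chat", "inbox sync", "dm send", "dm ", "conversation")):
--         if "started" in lower:
--             return "chats", "start"
--         if "retry" in lower: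
--             return "chats", "retry"
--         if "failed" in lower or "error" in lower:
--             return "chats", "fail"
--         if "send" in lower:
--             return "chats", "send"
--         if "sync" in lower or "imported" in lower or "complete" in lower:
--             return "chats", "sync"
--         return "chats", "event"
--
--     if "queue" in lower or "task=" in lower:
--         if any(token in lower for token in ("added", "enqueued")):
--             return "queue", "add"
--         if "updated" in lower or "expedited" in lower:
--             return "queue", "update"
--         if "removed" in lower or "delete" in lower or "deleted" in lower:
--             return "queue", "remove"
--         if "requeued" in lower:
--             return "queue", "requeue"
--         if "start" in lower or "execute" in lower:
--             return "queue", "execute"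
--         if "prefill" in lower or "scan" in lower:
--             return "queue", "prefill"
--         return "queue", "event"
--
--     if any(token in lower for token in ("profile", "login check", "session", "scheduler")):
--         if "check" in lower:
--             return "profiles", "check"
--         if "queued" in lower:
--             return "profiles", "queue"
--         if "running" in lower or "pass" in lower:
--             return "profiles", "run"
--         if "paused" in lower:
--             return "profiles", "pause"
--         if "resumed" in lower:
--             return "profiles", "resume"
--         if "outside schedule" in lower:
--             return "profiles", "schedule"
--         if "error" in lower or "failed" in lower:
--             return "profiles", "fail"
--         return "profiles", "event"
--
--     if any(token in lower for token in ("openai", "api key", "ai auto")):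
--         if "check" in lower or "test" in lower:
--             return "openai", "check_key"
--         if "generate" in lower or "reply" in lower:
--             return "openai", "generate"
--         return "openai", "event"
--
--     return "system", "event"
-- ===== SOURCE B (Python) =====
-- # Staged classifier: one pass computes the set of matched keywords, then the
-- # module and the action are chosen by minimum-priority-index selection (argmin
-- # over enumerated rules) instead of cascading first-match if/elif chains.
--
-- _MODULES = [
--     ("proxy", ["proxy"],
--      [("check", ["check", "passed", "retry", "failed"])], "event"),
--     ("chats", ["chat", "inbox sync", "dm send", "dm ", "conversation"],
--      [("start", ["started"]), ("retry", ["retry"]), ("fail", ["failed", "error"]),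
--       ("send", ["send"]), ("sync", ["sync", "imported", "complete"])], "event"),
--     ("queue", ["queue", "task="],
--      [("add", ["added", "enqueued"]), ("update", ["updated", "expedited"]),
--       ("remove", ["removed", "delete", "deleted"]), ("requeue", ["requeued"]),
--       ("execute", ["start", "execute"]), ("prefill", ["prefill", "scan"])], "event"),
--     ("profiles", ["profile", "login check", "session", "scheduler"],
--      [("check", ["check"]), ("queue", ["queued"]), ("run", ["running", "pass"]),
--       ("pause", ["paused"]), ("resume", ["resumed"]),
--       ("schedule", ["outside schedule"]), ("fail", ["error", "failed"])], "event"),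
--     ("openai", ["openai", "api key", "ai auto"],
--      [("check_key", ["check", "test"]), ("generate", ["generate", "reply"])], "event"),
-- ]
--
-- # the whole keyword vocabulary, deduplicated, fixed once
-- _TOKENS = sorted({t for _, trig, acts, _ in _MODULES
--                   for t in trig + [tok for _, toks in acts for tok in toks]})
--
--
-- def _infer_log_module_action(message):
--     lower = message.strip().lower()
--     hits = {t for t in _TOKENS if t in lower}          # single matching pass
--     best = min(((i, m) for i, m in enumerate(_MODULES) if not hits.isdisjoint(m[1])),
--                key=lambda p: p[0], default=None)
--     if best is None:
--         return "system", "event"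
--     _, (name, _, actions, default) = best
--     act = min(((j, a) for j, (a, toks) in enumerate(actions) if not hits.isdisjoint(toks)),
--               key=lambda p: p[0], default=None)
--     return name, default if act is None else act[1]
-- ===== Notes on version B (the rewrite author's own statement) =====
-- stated objective: alternative
-- what changed: Replaces A's cascading first-match if/elif decision tree by two staged passes: one pass computes the set of matched keywords from a fixed vocabulary, then the module and the action are each selected as the minimum-priority-index entry (argmin over enumerated rules) among those whose keyword set intersects the hits.
import Mathlib
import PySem

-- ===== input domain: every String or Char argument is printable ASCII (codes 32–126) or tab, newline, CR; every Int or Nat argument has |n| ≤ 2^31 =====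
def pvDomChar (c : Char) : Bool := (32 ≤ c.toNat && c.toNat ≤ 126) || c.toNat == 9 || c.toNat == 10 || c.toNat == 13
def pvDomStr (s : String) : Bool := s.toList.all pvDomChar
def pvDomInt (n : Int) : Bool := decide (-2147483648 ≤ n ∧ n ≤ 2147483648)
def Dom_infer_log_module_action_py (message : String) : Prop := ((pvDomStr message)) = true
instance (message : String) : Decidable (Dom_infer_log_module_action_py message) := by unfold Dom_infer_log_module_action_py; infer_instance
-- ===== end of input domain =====

-- B replaces A's cascading if/elif classifier by two staged passes: one pass computes the
-- set of matched keywords, then module and action are selected by minimum-priority-index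
-- (argmin over enumerated rules); objective: alternative, same behaviour and cost.


-- ===== PORT A =====
def infer_log_module_action_py (message : String) : String × String :=
  -- text = str(message or "").strip(); lower = text.lower()
  let text := PySem.Str.strip (if message = "" then "" else message)
  let lower := PySem.Str.lower text
  if PySem.Str.isIn "proxy" lower then
    if PySem.Str.isIn "check" lower || (PySem.Str.isIn "passed" lower || (PySem.Str.isIn "retry" lower || (PySem.Str.isIn "failed" lower))) then ("proxy", "check")
    else
    ("proxy", "event")
  else
  if ["chat", "inbox sync", "dm send", "dm ", "conversation"].any (fun t => PySem.Str.isIn t lower) then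
    if PySem.Str.isIn "started" lower then ("chats", "start")
    else
    if PySem.Str.isIn "retry" lower then ("chats", "retry")
    else
    if PySem.Str.isIn "failed" lower || (PySem.Str.isIn "error" lower) then ("chats", "fail")
    else
    if PySem.Str.isIn "send" lower then ("chats", "send")
    else
    if PySem.Str.isIn "sync" lower || (PySem.Str.isIn "imported" lower || (PySem.Str.isIn "complete" lower)) then ("chats", "sync")
    else
    ("chats", "event")
  else
  if PySem.Str.isIn "queue" lower || (PySem.Str.isIn "task=" lower) then
    if ["added", "enqueued"].any (fun t => PySem.Str.isIn t lower) then ("queue", "add")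
    else
    if PySem.Str.isIn "updated" lower || (PySem.Str.isIn "expedited" lower) then ("queue", "update")
    else
    if PySem.Str.isIn "removed" lower || (PySem.Str.isIn "delete" lower || (PySem.Str.isIn "deleted" lower)) then ("queue", "remove")
    else
    if PySem.Str.isIn "requeued" lower then ("queue", "requeue")
    else
    if PySem.Str.isIn "start" lower || (PySem.Str.isIn "execute" lower) then ("queue", "execute")
    else
    if PySem.Str.isIn "prefill" lower || (PySem.Str.isIn "scan" lower) then ("queue", "prefill")
    else
    ("queue", "event")
  else
  if ["profile", "login check", "session", "scheduler"].any (fun t => PySem.Str.isIn t lower) then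
    if PySem.Str.isIn "check" lower then ("profiles", "check")
    else
    if PySem.Str.isIn "queued" lower then ("profiles", "queue")
    else
    if PySem.Str.isIn "running" lower || (PySem.Str.isIn "pass" lower) then ("profiles", "run")
    else
    if PySem.Str.isIn "paused" lower then ("profiles", "pause")
    else
    if PySem.Str.isIn "resumed" lower then ("profiles", "resume")
    else
    if PySem.Str.isIn "outside schedule" lower then ("profiles", "schedule")
    else
    if PySem.Str.isIn "error" lower || (PySem.Str.isIn "failed" lower) then ("profiles", "fail")
    else
    ("profiles", "event")
  else
  if ["openai", "api key", "ai auto"].any (fun t => PySem.Str.isIn t lower) then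
    if PySem.Str.isIn "check" lower || (PySem.Str.isIn "test" lower) then ("openai", "check_key")
    else
    if PySem.Str.isIn "generate" lower || (PySem.Str.isIn "reply" lower) then ("openai", "generate")
    else
    ("openai", "event")
  else
  ("system", "event")

-- ===== PORT B =====
-- _TOKENS: the deduplicated, sorted keyword vocabulary of Source B (a fixed literal there too)
def pvTokens : List String := ["added", "ai auto", "api key", "chat", "check", "complete", "conversation", "delete", "deleted", "dm ", "dm send", "enqueued", "error", "execute", "expedited", "failed", "generate", "imported", "inbox sync", "login check", "openai", "outside schedule", "pass", "passed", "paused", "prefill", "profile", "proxy", "queue", "queued", "removed", "reply", "requeued", "resumed", "retry", "running", "scan", "scheduler", "send", "session", "start", "started", "sync", "task=", "test", "updated"]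

-- _MODULES: the rule table of Source B
def pvModules : List (String × List String × List (String × List String) × String) :=
  [("proxy", ["proxy"], [("check", ["check", "passed", "retry", "failed"])], "event"), ("chats", ["chat", "inbox sync", "dm send", "dm ", "conversation"], [("start", ["started"]), ("retry", ["retry"]), ("fail", ["failed", "error"]), ("send", ["send"]), ("sync", ["sync", "imported", "complete"])], "event"), ("queue", ["queue", "task="], [("add", ["added", "enqueued"]), ("update", ["updated", "expedited"]), ("remove", ["removed", "delete", "deleted"]), ("requeue", ["requeued"]), ("execute", ["start", "execute"]), ("prefill", ["prefill", "scan"])], "event"), ("profiles", ["profile", "login check", "session", "scheduler"], [("check", ["check"]), ("queue", ["queued"]), ("run", ["running", "pass"]), ("pause", ["paused"]), ("resume", ["resumed"]), ("schedule", ["outside schedule"]), ("fail", ["error", "failed"])], "event"), ("openai", ["openai", "api key", "ai auto"], [("check_key", ["check", "test"]), ("generate", ["generate", "reply"])], "event")]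

-- hits = {t for t in _TOKENS if t in lower}  (single matching pass)
def pvHits (lower : String) : PySem.Set String :=
  PySem.Set.ofList (pvTokens.filter (fun t => PySem.Str.isIn t lower))

-- not hits.isdisjoint(toks)
def pvHitAny (lower : String) (toks : List String) : Bool :=
  toks.any (fun t => PySem.Set.contains (pvHits lower) t)

-- min(pairs, key=lambda p: p[0], default=None): first element with minimal first component
def pvMinByFst {α : Type} : List (Int × α) → Option (Int × α)
  | [] => none
  | x :: xs => some (xs.foldl (fun b y => if y.1 < b.1 then y else b) x)

def pvClassify (lower : String) : String × String :=
  match pvMinByFst ((PySem.List.enumerate pvModules).filter (fun im => pvHitAny lower im.2.2.1)) with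
  | none => ("system", "event")
  | some (_, (name, _, actions, dflt)) =>
      match pvMinByFst ((PySem.List.enumerate actions).filter (fun ja => pvHitAny lower ja.2.2)) with
      | none => (name, dflt)
      | some (_, (act, _)) => (name, act)

def infer_log_module_action_py_alt (message : String) : String × String :=
  pvClassify (PySem.Str.lower (PySem.Str.strip message))

-- ===== PRECONDITION & SPEC =====
def Spec_infer_log_module_action_py (message : String) (out : String × String) : Prop := out = infer_log_module_action_py_alt message
instance (message : String) (out : String × String) : Decidable (Spec_infer_log_module_action_py message out) := by unfold Spec_infer_log_module_action_py; infer_instance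

-- ===== CLAIM =====
def Claim_equal_infer_log_module_action_py : Prop := ∀ (message : String), Dom_infer_log_module_action_py message → Spec_infer_log_module_action_py message (infer_log_module_action_py message)

-- ===== LEMMAS AND PROOFS =====

-- `message or ""` in A is the identity on strings
theorem pv_or_empty (message : String) : (if message = "" then "" else message) = message := by
  split <;> simp_all

-- the running-min fold keeps its accumulator when nothing is strictly smaller
theorem pvFoldlMin_keep {α : Type} (xs : List (Int × α)) (acc : Int × α)
    (h : ∀ y ∈ xs, acc.1 ≤ y.1) :
    xs.foldl (fun b y => if y.1 < b.1 then y else b) acc = acc := by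
  induction xs with
  | nil => rfl
  | cons y t ih =>
      have hy := h y (List.mem_cons_self ..)
      simp only [List.foldl_cons, if_neg (by omega : ¬ y.1 < acc.1)]
      exact ih (fun z hz => h z (List.mem_cons_of_mem _ hz))

-- on a list whose first components are nondecreasing, min-by-first is the head
theorem pvMinByFst_eq_head {α : Type} (l : List (Int × α))
    (h : l.Pairwise (fun a b => a.1 ≤ b.1)) : pvMinByFst l = l.head? := by
  cases l with
  | nil => rfl
  | cons x xs =>
      simp only [pvMinByFst, List.head?_cons]
      rw [pvFoldlMin_keep xs x (fun y hy => List.rel_of_pairwise_cons h hy)]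

-- any filter of an enumeration has increasing indices, so min-by-first = first match
theorem pvMinByFst_filter_enum {α : Type} (l : List α) (s : Int) (f : Int × α → Bool) :
    pvMinByFst ((PySem.List.enumerate l s).filter f) = ((PySem.List.enumerate l s).filter f).head? := by
  refine pvMinByFst_eq_head _ ?_
  exact ((PySem.List.pairwise_lt_enumerate l s).imp (fun h => le_of_lt h)).filter f

-- membership in the hit set is just the substring test (tokens are in the vocabulary)
theorem pvContains_hits (lower t : String) :
    PySem.Set.contains (pvHits lower) t = (pvTokens.contains t && PySem.Str.isIn t lower) := by
  simp [pvHits, PySem.Set.contains_eq_listContains, List.contains_eq_mem,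
    PySem.Set.mem_ofList, List.mem_filter]

theorem pvHit_m0 (lower : String) : pvHitAny lower ["proxy"] = (PySem.Str.isIn "proxy" lower) := by
  simp only [pvHitAny, List.any_cons, List.any_nil, pvContains_hits, Bool.or_false]
  simp [pvTokens]
theorem pvHit_m0a0 (lower : String) : pvHitAny lower ["check", "passed", "retry", "failed"] = (PySem.Str.isIn "check" lower || (PySem.Str.isIn "passed" lower || (PySem.Str.isIn "retry" lower || (PySem.Str.isIn "failed" lower)))) := by
  simp only [pvHitAny, List.any_cons, List.any_nil, pvContains_hits, Bool.or_false]
  simp [pvTokens]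
theorem pvHit_m1 (lower : String) : pvHitAny lower ["chat", "inbox sync", "dm send", "dm ", "conversation"] = (PySem.Str.isIn "chat" lower || (PySem.Str.isIn "inbox sync" lower || (PySem.Str.isIn "dm send" lower || (PySem.Str.isIn "dm " lower || (PySem.Str.isIn "conversation" lower))))) := by
  simp only [pvHitAny, List.any_cons, List.any_nil, pvContains_hits, Bool.or_false]
  simp [pvTokens]
theorem pvHit_m1a0 (lower : String) : pvHitAny lower ["started"] = (PySem.Str.isIn "started" lower) := by
  simp only [pvHitAny, List.any_cons, List.any_nil, pvContains_hits, Bool.or_false]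
  simp [pvTokens]
theorem pvHit_m1a1 (lower : String) : pvHitAny lower ["retry"] = (PySem.Str.isIn "retry" lower) := by
  simp only [pvHitAny, List.any_cons, List.any_nil, pvContains_hits, Bool.or_false]
  simp [pvTokens]
theorem pvHit_m1a2 (lower : String) : pvHitAny lower ["failed", "error"] = (PySem.Str.isIn "failed" lower || (PySem.Str.isIn "error" lower)) := by
  simp only [pvHitAny, List.any_cons, List.any_nil, pvContains_hits, Bool.or_false]
  simp [pvTokens]
theorem pvHit_m1a3 (lower : String) : pvHitAny lower ["send"] = (PySem.Str.isIn "send" lower) := by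
  simp only [pvHitAny, List.any_cons, List.any_nil, pvContains_hits, Bool.or_false]
  simp [pvTokens]
theorem pvHit_m1a4 (lower : String) : pvHitAny lower ["sync", "imported", "complete"] = (PySem.Str.isIn "sync" lower || (PySem.Str.isIn "imported" lower || (PySem.Str.isIn "complete" lower))) := by
  simp only [pvHitAny, List.any_cons, List.any_nil, pvContains_hits, Bool.or_false]
  simp [pvTokens]
theorem pvHit_m2 (lower : String) : pvHitAny lower ["queue", "task="] = (PySem.Str.isIn "queue" lower || (PySem.Str.isIn "task=" lower)) := by
  simp only [pvHitAny, List.any_cons, List.any_nil, pvContains_hits, Bool.or_false]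
  simp [pvTokens]
theorem pvHit_m2a0 (lower : String) : pvHitAny lower ["added", "enqueued"] = (PySem.Str.isIn "added" lower || (PySem.Str.isIn "enqueued" lower)) := by
  simp only [pvHitAny, List.any_cons, List.any_nil, pvContains_hits, Bool.or_false]
  simp [pvTokens]
theorem pvHit_m2a1 (lower : String) : pvHitAny lower ["updated", "expedited"] = (PySem.Str.isIn "updated" lower || (PySem.Str.isIn "expedited" lower)) := by
  simp only [pvHitAny, List.any_cons, List.any_nil, pvContains_hits, Bool.or_false]
  simp [pvTokens]
theorem pvHit_m2a2 (lower : String) : pvHitAny lower ["removed", "delete", "deleted"] = (PySem.Str.isIn "removed" lower || (PySem.Str.isIn "delete" lower || (PySem.Str.isIn "deleted" lower))) := by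
  simp only [pvHitAny, List.any_cons, List.any_nil, pvContains_hits, Bool.or_false]
  simp [pvTokens]
theorem pvHit_m2a3 (lower : String) : pvHitAny lower ["requeued"] = (PySem.Str.isIn "requeued" lower) := by
  simp only [pvHitAny, List.any_cons, List.any_nil, pvContains_hits, Bool.or_false]
  simp [pvTokens]
theorem pvHit_m2a4 (lower : String) : pvHitAny lower ["start", "execute"] = (PySem.Str.isIn "start" lower || (PySem.Str.isIn "execute" lower)) := by
  simp only [pvHitAny, List.any_cons, List.any_nil, pvContains_hits, Bool.or_false]
  simp [pvTokens]
theorem pvHit_m2a5 (lower : String) : pvHitAny lower ["prefill", "scan"] = (PySem.Str.isIn "prefill" lower || (PySem.Str.isIn "scan" lower)) := by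
  simp only [pvHitAny, List.any_cons, List.any_nil, pvContains_hits, Bool.or_false]
  simp [pvTokens]
theorem pvHit_m3 (lower : String) : pvHitAny lower ["profile", "login check", "session", "scheduler"] = (PySem.Str.isIn "profile" lower || (PySem.Str.isIn "login check" lower || (PySem.Str.isIn "session" lower || (PySem.Str.isIn "scheduler" lower)))) := by
  simp only [pvHitAny, List.any_cons, List.any_nil, pvContains_hits, Bool.or_false]
  simp [pvTokens]
theorem pvHit_m3a0 (lower : String) : pvHitAny lower ["check"] = (PySem.Str.isIn "check" lower) := by
  simp only [pvHitAny, List.any_cons, List.any_nil, pvContains_hits, Bool.or_false]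
  simp [pvTokens]
theorem pvHit_m3a1 (lower : String) : pvHitAny lower ["queued"] = (PySem.Str.isIn "queued" lower) := by
  simp only [pvHitAny, List.any_cons, List.any_nil, pvContains_hits, Bool.or_false]
  simp [pvTokens]
theorem pvHit_m3a2 (lower : String) : pvHitAny lower ["running", "pass"] = (PySem.Str.isIn "running" lower || (PySem.Str.isIn "pass" lower)) := by
  simp only [pvHitAny, List.any_cons, List.any_nil, pvContains_hits, Bool.or_false]
  simp [pvTokens]
theorem pvHit_m3a3 (lower : String) : pvHitAny lower ["paused"] = (PySem.Str.isIn "paused" lower) := by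
  simp only [pvHitAny, List.any_cons, List.any_nil, pvContains_hits, Bool.or_false]
  simp [pvTokens]
theorem pvHit_m3a4 (lower : String) : pvHitAny lower ["resumed"] = (PySem.Str.isIn "resumed" lower) := by
  simp only [pvHitAny, List.any_cons, List.any_nil, pvContains_hits, Bool.or_false]
  simp [pvTokens]
theorem pvHit_m3a5 (lower : String) : pvHitAny lower ["outside schedule"] = (PySem.Str.isIn "outside schedule" lower) := by
  simp only [pvHitAny, List.any_cons, List.any_nil, pvContains_hits, Bool.or_false]
  simp [pvTokens]
theorem pvHit_m3a6 (lower : String) : pvHitAny lower ["error", "failed"] = (PySem.Str.isIn "error" lower || (PySem.Str.isIn "failed" lower)) := by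
  simp only [pvHitAny, List.any_cons, List.any_nil, pvContains_hits, Bool.or_false]
  simp [pvTokens]
theorem pvHit_m4 (lower : String) : pvHitAny lower ["openai", "api key", "ai auto"] = (PySem.Str.isIn "openai" lower || (PySem.Str.isIn "api key" lower || (PySem.Str.isIn "ai auto" lower))) := by
  simp only [pvHitAny, List.any_cons, List.any_nil, pvContains_hits, Bool.or_false]
  simp [pvTokens]
theorem pvHit_m4a0 (lower : String) : pvHitAny lower ["check", "test"] = (PySem.Str.isIn "check" lower || (PySem.Str.isIn "test" lower)) := by
  simp only [pvHitAny, List.any_cons, List.any_nil, pvContains_hits, Bool.or_false]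
  simp [pvTokens]
theorem pvHit_m4a1 (lower : String) : pvHitAny lower ["generate", "reply"] = (PySem.Str.isIn "generate" lower || (PySem.Str.isIn "reply" lower)) := by
  simp only [pvHitAny, List.any_cons, List.any_nil, pvContains_hits, Bool.or_false]
  simp [pvTokens]

-- B's staged argmin classifier equals A's decision tree
theorem pvClassify_eq (lower : String) :
    pvClassify lower =
    if PySem.Str.isIn "proxy" lower then
      if PySem.Str.isIn "check" lower || (PySem.Str.isIn "passed" lower || (PySem.Str.isIn "retry" lower || (PySem.Str.isIn "failed" lower))) then ("proxy", "check")
      else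
      ("proxy", "event")
    else
    if ["chat", "inbox sync", "dm send", "dm ", "conversation"].any (fun t => PySem.Str.isIn t lower) then
      if PySem.Str.isIn "started" lower then ("chats", "start")
      else
      if PySem.Str.isIn "retry" lower then ("chats", "retry")
      else
      if PySem.Str.isIn "failed" lower || (PySem.Str.isIn "error" lower) then ("chats", "fail")
      else
      if PySem.Str.isIn "send" lower then ("chats", "send")
      else
      if PySem.Str.isIn "sync" lower || (PySem.Str.isIn "imported" lower || (PySem.Str.isIn "complete" lower)) then ("chats", "sync")
      else
      ("chats", "event")
    else
    if PySem.Str.isIn "queue" lower || (PySem.Str.isIn "task=" lower) then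
      if ["added", "enqueued"].any (fun t => PySem.Str.isIn t lower) then ("queue", "add")
      else
      if PySem.Str.isIn "updated" lower || (PySem.Str.isIn "expedited" lower) then ("queue", "update")
      else
      if PySem.Str.isIn "removed" lower || (PySem.Str.isIn "delete" lower || (PySem.Str.isIn "deleted" lower)) then ("queue", "remove")
      else
      if PySem.Str.isIn "requeued" lower then ("queue", "requeue")
      else
      if PySem.Str.isIn "start" lower || (PySem.Str.isIn "execute" lower) then ("queue", "execute")
      else
      if PySem.Str.isIn "prefill" lower || (PySem.Str.isIn "scan" lower) then ("queue", "prefill")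
      else
      ("queue", "event")
    else
    if ["profile", "login check", "session", "scheduler"].any (fun t => PySem.Str.isIn t lower) then
      if PySem.Str.isIn "check" lower then ("profiles", "check")
      else
      if PySem.Str.isIn "queued" lower then ("profiles", "queue")
      else
      if PySem.Str.isIn "running" lower || (PySem.Str.isIn "pass" lower) then ("profiles", "run")
      else
      if PySem.Str.isIn "paused" lower then ("profiles", "pause")
      else
      if PySem.Str.isIn "resumed" lower then ("profiles", "resume")
      else
      if PySem.Str.isIn "outside schedule" lower then ("profiles", "schedule")
      else
      if PySem.Str.isIn "error" lower || (PySem.Str.isIn "failed" lower) then ("profiles", "fail")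
      else
      ("profiles", "event")
    else
    if ["openai", "api key", "ai auto"].any (fun t => PySem.Str.isIn t lower) then
      if PySem.Str.isIn "check" lower || (PySem.Str.isIn "test" lower) then ("openai", "check_key")
      else
      if PySem.Str.isIn "generate" lower || (PySem.Str.isIn "reply" lower) then ("openai", "generate")
      else
      ("openai", "event")
    else
    ("system", "event") := by
  unfold pvClassify
  simp only [pvMinByFst_filter_enum]
  cases hm0 : (PySem.Str.isIn "proxy" lower)
  · cases hm1 : (PySem.Str.isIn "chat" lower || (PySem.Str.isIn "inbox sync" lower || (PySem.Str.isIn "dm send" lower || (PySem.Str.isIn "dm " lower || (PySem.Str.isIn "conversation" lower)))))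
    · cases hm2 : (PySem.Str.isIn "queue" lower || (PySem.Str.isIn "task=" lower))
      · cases hm3 : (PySem.Str.isIn "profile" lower || (PySem.Str.isIn "login check" lower || (PySem.Str.isIn "session" lower || (PySem.Str.isIn "scheduler" lower))))
        · cases hm4 : (PySem.Str.isIn "openai" lower || (PySem.Str.isIn "api key" lower || (PySem.Str.isIn "ai auto" lower)))
          · simp_all [PySem.List.enumerate, pvModules, pvMinByFst_filter_enum, List.find?_cons, List.find?_nil, List.any_cons, List.any_nil, pvHit_m0, pvHit_m0a0, pvHit_m1, pvHit_m1a0, pvHit_m1a1, pvHit_m1a2, pvHit_m1a3, pvHit_m1a4, pvHit_m2, pvHit_m2a0, pvHit_m2a1, pvHit_m2a2, pvHit_m2a3, pvHit_m2a4, pvHit_m2a5, pvHit_m3, pvHit_m3a0, pvHit_m3a1, pvHit_m3a2, pvHit_m3a3, pvHit_m3a4, pvHit_m3a5, pvHit_m3a6, pvHit_m4, pvHit_m4a0, pvHit_m4a1]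
          · cases hd0 : (PySem.Str.isIn "check" lower || (PySem.Str.isIn "test" lower))
            · cases hd1 : (PySem.Str.isIn "generate" lower || (PySem.Str.isIn "reply" lower))
              · simp_all [PySem.List.enumerate, pvModules, pvMinByFst_filter_enum, List.find?_cons, List.find?_nil, List.any_cons, List.any_nil, pvHit_m0, pvHit_m0a0, pvHit_m1, pvHit_m1a0, pvHit_m1a1, pvHit_m1a2, pvHit_m1a3, pvHit_m1a4, pvHit_m2, pvHit_m2a0, pvHit_m2a1, pvHit_m2a2, pvHit_m2a3, pvHit_m2a4, pvHit_m2a5, pvHit_m3, pvHit_m3a0, pvHit_m3a1, pvHit_m3a2, pvHit_m3a3, pvHit_m3a4, pvHit_m3a5, pvHit_m3a6, pvHit_m4, pvHit_m4a0, pvHit_m4a1]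
              · simp_all [PySem.List.enumerate, pvModules, pvMinByFst_filter_enum, List.find?_cons, List.find?_nil, List.any_cons, List.any_nil, pvHit_m0, pvHit_m0a0, pvHit_m1, pvHit_m1a0, pvHit_m1a1, pvHit_m1a2, pvHit_m1a3, pvHit_m1a4, pvHit_m2, pvHit_m2a0, pvHit_m2a1, pvHit_m2a2, pvHit_m2a3, pvHit_m2a4, pvHit_m2a5, pvHit_m3, pvHit_m3a0, pvHit_m3a1, pvHit_m3a2, pvHit_m3a3, pvHit_m3a4, pvHit_m3a5, pvHit_m3a6, pvHit_m4, pvHit_m4a0, pvHit_m4a1]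
            · simp_all [PySem.List.enumerate, pvModules, pvMinByFst_filter_enum, List.find?_cons, List.find?_nil, List.any_cons, List.any_nil, pvHit_m0, pvHit_m0a0, pvHit_m1, pvHit_m1a0, pvHit_m1a1, pvHit_m1a2, pvHit_m1a3, pvHit_m1a4, pvHit_m2, pvHit_m2a0, pvHit_m2a1, pvHit_m2a2, pvHit_m2a3, pvHit_m2a4, pvHit_m2a5, pvHit_m3, pvHit_m3a0, pvHit_m3a1, pvHit_m3a2, pvHit_m3a3, pvHit_m3a4, pvHit_m3a5, pvHit_m3a6, pvHit_m4, pvHit_m4a0, pvHit_m4a1]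
        · cases hd0 : (PySem.Str.isIn "check" lower)
          · cases hd1 : (PySem.Str.isIn "queued" lower)
            · cases hd2 : (PySem.Str.isIn "running" lower || (PySem.Str.isIn "pass" lower))
              · cases hd3 : (PySem.Str.isIn "paused" lower)
                · cases hd4 : (PySem.Str.isIn "resumed" lower)
                  · cases hd5 : (PySem.Str.isIn "outside schedule" lower)
                    · cases hd6 : (PySem.Str.isIn "error" lower || (PySem.Str.isIn "failed" lower))
                      · simp_all [PySem.List.enumerate, pvModules, pvMinByFst_filter_enum, List.find?_cons, List.find?_nil, List.any_cons, List.any_nil, pvHit_m0, pvHit_m0a0, pvHit_m1, pvHit_m1a0, pvHit_m1a1, pvHit_m1a2, pvHit_m1a3, pvHit_m1a4, pvHit_m2, pvHit_m2a0, pvHit_m2a1, pvHit_m2a2, pvHit_m2a3, pvHit_m2a4, pvHit_m2a5, pvHit_m3, pvHit_m3a0, pvHit_m3a1, pvHit_m3a2, pvHit_m3a3, pvHit_m3a4, pvHit_m3a5, pvHit_m3a6, pvHit_m4, pvHit_m4a0, pvHit_m4a1]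
                      · simp_all [PySem.List.enumerate, pvModules, pvMinByFst_filter_enum, List.find?_cons, List.find?_nil, List.any_cons, List.any_nil, pvHit_m0, pvHit_m0a0, pvHit_m1, pvHit_m1a0, pvHit_m1a1, pvHit_m1a2, pvHit_m1a3, pvHit_m1a4, pvHit_m2, pvHit_m2a0, pvHit_m2a1, pvHit_m2a2, pvHit_m2a3, pvHit_m2a4, pvHit_m2a5, pvHit_m3, pvHit_m3a0, pvHit_m3a1, pvHit_m3a2, pvHit_m3a3, pvHit_m3a4, pvHit_m3a5, pvHit_m3a6, pvHit_m4, pvHit_m4a0, pvHit_m4a1]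
                    · simp_all [PySem.List.enumerate, pvModules, pvMinByFst_filter_enum, List.find?_cons, List.find?_nil, List.any_cons, List.any_nil, pvHit_m0, pvHit_m0a0, pvHit_m1, pvHit_m1a0, pvHit_m1a1, pvHit_m1a2, pvHit_m1a3, pvHit_m1a4, pvHit_m2, pvHit_m2a0, pvHit_m2a1, pvHit_m2a2, pvHit_m2a3, pvHit_m2a4, pvHit_m2a5, pvHit_m3, pvHit_m3a0, pvHit_m3a1, pvHit_m3a2, pvHit_m3a3, pvHit_m3a4, pvHit_m3a5, pvHit_m3a6, pvHit_m4, pvHit_m4a0, pvHit_m4a1]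
                  · simp_all [PySem.List.enumerate, pvModules, pvMinByFst_filter_enum, List.find?_cons, List.find?_nil, List.any_cons, List.any_nil, pvHit_m0, pvHit_m0a0, pvHit_m1, pvHit_m1a0, pvHit_m1a1, pvHit_m1a2, pvHit_m1a3, pvHit_m1a4, pvHit_m2, pvHit_m2a0, pvHit_m2a1, pvHit_m2a2, pvHit_m2a3, pvHit_m2a4, pvHit_m2a5, pvHit_m3, pvHit_m3a0, pvHit_m3a1, pvHit_m3a2, pvHit_m3a3, pvHit_m3a4, pvHit_m3a5, pvHit_m3a6, pvHit_m4, pvHit_m4a0, pvHit_m4a1]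
                · simp_all [PySem.List.enumerate, pvModules, pvMinByFst_filter_enum, List.find?_cons, List.find?_nil, List.any_cons, List.any_nil, pvHit_m0, pvHit_m0a0, pvHit_m1, pvHit_m1a0, pvHit_m1a1, pvHit_m1a2, pvHit_m1a3, pvHit_m1a4, pvHit_m2, pvHit_m2a0, pvHit_m2a1, pvHit_m2a2, pvHit_m2a3, pvHit_m2a4, pvHit_m2a5, pvHit_m3, pvHit_m3a0, pvHit_m3a1, pvHit_m3a2, pvHit_m3a3, pvHit_m3a4, pvHit_m3a5, pvHit_m3a6, pvHit_m4, pvHit_m4a0, pvHit_m4a1]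
              · simp_all [PySem.List.enumerate, pvModules, pvMinByFst_filter_enum, List.find?_cons, List.find?_nil, List.any_cons, List.any_nil, pvHit_m0, pvHit_m0a0, pvHit_m1, pvHit_m1a0, pvHit_m1a1, pvHit_m1a2, pvHit_m1a3, pvHit_m1a4, pvHit_m2, pvHit_m2a0, pvHit_m2a1, pvHit_m2a2, pvHit_m2a3, pvHit_m2a4, pvHit_m2a5, pvHit_m3, pvHit_m3a0, pvHit_m3a1, pvHit_m3a2, pvHit_m3a3, pvHit_m3a4, pvHit_m3a5, pvHit_m3a6, pvHit_m4, pvHit_m4a0, pvHit_m4a1]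
            · simp_all [PySem.List.enumerate, pvModules, pvMinByFst_filter_enum, List.find?_cons, List.find?_nil, List.any_cons, List.any_nil, pvHit_m0, pvHit_m0a0, pvHit_m1, pvHit_m1a0, pvHit_m1a1, pvHit_m1a2, pvHit_m1a3, pvHit_m1a4, pvHit_m2, pvHit_m2a0, pvHit_m2a1, pvHit_m2a2, pvHit_m2a3, pvHit_m2a4, pvHit_m2a5, pvHit_m3, pvHit_m3a0, pvHit_m3a1, pvHit_m3a2, pvHit_m3a3, pvHit_m3a4, pvHit_m3a5, pvHit_m3a6, pvHit_m4, pvHit_m4a0, pvHit_m4a1]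
          · simp_all [PySem.List.enumerate, pvModules, pvMinByFst_filter_enum, List.find?_cons, List.find?_nil, List.any_cons, List.any_nil, pvHit_m0, pvHit_m0a0, pvHit_m1, pvHit_m1a0, pvHit_m1a1, pvHit_m1a2, pvHit_m1a3, pvHit_m1a4, pvHit_m2, pvHit_m2a0, pvHit_m2a1, pvHit_m2a2, pvHit_m2a3, pvHit_m2a4, pvHit_m2a5, pvHit_m3, pvHit_m3a0, pvHit_m3a1, pvHit_m3a2, pvHit_m3a3, pvHit_m3a4, pvHit_m3a5, pvHit_m3a6, pvHit_m4, pvHit_m4a0, pvHit_m4a1]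
      · cases hd0 : (PySem.Str.isIn "added" lower || (PySem.Str.isIn "enqueued" lower))
        · cases hd1 : (PySem.Str.isIn "updated" lower || (PySem.Str.isIn "expedited" lower))
          · cases hd2 : (PySem.Str.isIn "removed" lower || (PySem.Str.isIn "delete" lower || (PySem.Str.isIn "deleted" lower)))
            · cases hd3 : (PySem.Str.isIn "requeued" lower)
              · cases hd4 : (PySem.Str.isIn "start" lower || (PySem.Str.isIn "execute" lower))
                · cases hd5 : (PySem.Str.isIn "prefill" lower || (PySem.Str.isIn "scan" lower))
                  · simp_all [PySem.List.enumerate, pvModules, pvMinByFst_filter_enum, List.find?_cons, List.find?_nil, List.any_cons, List.any_nil, pvHit_m0, pvHit_m0a0, pvHit_m1, pvHit_m1a0, pvHit_m1a1, pvHit_m1a2, pvHit_m1a3, pvHit_m1a4, pvHit_m2, pvHit_m2a0, pvHit_m2a1, pvHit_m2a2, pvHit_m2a3, pvHit_m2a4, pvHit_m2a5, pvHit_m3, pvHit_m3a0, pvHit_m3a1, pvHit_m3a2, pvHit_m3a3, pvHit_m3a4, pvHit_m3a5, pvHit_m3a6, pvHit_m4, pvHit_m4a0, pvHit_m4a1]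
                  · simp_all [PySem.List.enumerate, pvModules, pvMinByFst_filter_enum, List.find?_cons, List.find?_nil, List.any_cons, List.any_nil, pvHit_m0, pvHit_m0a0, pvHit_m1, pvHit_m1a0, pvHit_m1a1, pvHit_m1a2, pvHit_m1a3, pvHit_m1a4, pvHit_m2, pvHit_m2a0, pvHit_m2a1, pvHit_m2a2, pvHit_m2a3, pvHit_m2a4, pvHit_m2a5, pvHit_m3, pvHit_m3a0, pvHit_m3a1, pvHit_m3a2, pvHit_m3a3, pvHit_m3a4, pvHit_m3a5, pvHit_m3a6, pvHit_m4, pvHit_m4a0, pvHit_m4a1]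
                · simp_all [PySem.List.enumerate, pvModules, pvMinByFst_filter_enum, List.find?_cons, List.find?_nil, List.any_cons, List.any_nil, pvHit_m0, pvHit_m0a0, pvHit_m1, pvHit_m1a0, pvHit_m1a1, pvHit_m1a2, pvHit_m1a3, pvHit_m1a4, pvHit_m2, pvHit_m2a0, pvHit_m2a1, pvHit_m2a2, pvHit_m2a3, pvHit_m2a4, pvHit_m2a5, pvHit_m3, pvHit_m3a0, pvHit_m3a1, pvHit_m3a2, pvHit_m3a3, pvHit_m3a4, pvHit_m3a5, pvHit_m3a6, pvHit_m4, pvHit_m4a0, pvHit_m4a1]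
              · simp_all [PySem.List.enumerate, pvModules, pvMinByFst_filter_enum, List.find?_cons, List.find?_nil, List.any_cons, List.any_nil, pvHit_m0, pvHit_m0a0, pvHit_m1, pvHit_m1a0, pvHit_m1a1, pvHit_m1a2, pvHit_m1a3, pvHit_m1a4, pvHit_m2, pvHit_m2a0, pvHit_m2a1, pvHit_m2a2, pvHit_m2a3, pvHit_m2a4, pvHit_m2a5, pvHit_m3, pvHit_m3a0, pvHit_m3a1, pvHit_m3a2, pvHit_m3a3, pvHit_m3a4, pvHit_m3a5, pvHit_m3a6, pvHit_m4, pvHit_m4a0, pvHit_m4a1]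
            · simp_all [PySem.List.enumerate, pvModules, pvMinByFst_filter_enum, List.find?_cons, List.find?_nil, List.any_cons, List.any_nil, pvHit_m0, pvHit_m0a0, pvHit_m1, pvHit_m1a0, pvHit_m1a1, pvHit_m1a2, pvHit_m1a3, pvHit_m1a4, pvHit_m2, pvHit_m2a0, pvHit_m2a1, pvHit_m2a2, pvHit_m2a3, pvHit_m2a4, pvHit_m2a5, pvHit_m3, pvHit_m3a0, pvHit_m3a1, pvHit_m3a2, pvHit_m3a3, pvHit_m3a4, pvHit_m3a5, pvHit_m3a6, pvHit_m4, pvHit_m4a0, pvHit_m4a1]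
          · simp_all [PySem.List.enumerate, pvModules, pvMinByFst_filter_enum, List.find?_cons, List.find?_nil, List.any_cons, List.any_nil, pvHit_m0, pvHit_m0a0, pvHit_m1, pvHit_m1a0, pvHit_m1a1, pvHit_m1a2, pvHit_m1a3, pvHit_m1a4, pvHit_m2, pvHit_m2a0, pvHit_m2a1, pvHit_m2a2, pvHit_m2a3, pvHit_m2a4, pvHit_m2a5, pvHit_m3, pvHit_m3a0, pvHit_m3a1, pvHit_m3a2, pvHit_m3a3, pvHit_m3a4, pvHit_m3a5, pvHit_m3a6, pvHit_m4, pvHit_m4a0, pvHit_m4a1]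
        · simp_all [PySem.List.enumerate, pvModules, pvMinByFst_filter_enum, List.find?_cons, List.find?_nil, List.any_cons, List.any_nil, pvHit_m0, pvHit_m0a0, pvHit_m1, pvHit_m1a0, pvHit_m1a1, pvHit_m1a2, pvHit_m1a3, pvHit_m1a4, pvHit_m2, pvHit_m2a0, pvHit_m2a1, pvHit_m2a2, pvHit_m2a3, pvHit_m2a4, pvHit_m2a5, pvHit_m3, pvHit_m3a0, pvHit_m3a1, pvHit_m3a2, pvHit_m3a3, pvHit_m3a4, pvHit_m3a5, pvHit_m3a6, pvHit_m4, pvHit_m4a0, pvHit_m4a1]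
    · cases hd0 : (PySem.Str.isIn "started" lower)
      · cases hd1 : (PySem.Str.isIn "retry" lower)
        · cases hd2 : (PySem.Str.isIn "failed" lower || (PySem.Str.isIn "error" lower))
          · cases hd3 : (PySem.Str.isIn "send" lower)
            · cases hd4 : (PySem.Str.isIn "sync" lower || (PySem.Str.isIn "imported" lower || (PySem.Str.isIn "complete" lower)))
              · simp_all [PySem.List.enumerate, pvModules, pvMinByFst_filter_enum, List.find?_cons, List.find?_nil, List.any_cons, List.any_nil, pvHit_m0, pvHit_m0a0, pvHit_m1, pvHit_m1a0, pvHit_m1a1, pvHit_m1a2, pvHit_m1a3, pvHit_m1a4, pvHit_m2, pvHit_m2a0, pvHit_m2a1, pvHit_m2a2, pvHit_m2a3, pvHit_m2a4, pvHit_m2a5, pvHit_m3, pvHit_m3a0, pvHit_m3a1, pvHit_m3a2, pvHit_m3a3, pvHit_m3a4, pvHit_m3a5, pvHit_m3a6, pvHit_m4, pvHit_m4a0, pvHit_m4a1]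
              · simp_all [PySem.List.enumerate, pvModules, pvMinByFst_filter_enum, List.find?_cons, List.find?_nil, List.any_cons, List.any_nil, pvHit_m0, pvHit_m0a0, pvHit_m1, pvHit_m1a0, pvHit_m1a1, pvHit_m1a2, pvHit_m1a3, pvHit_m1a4, pvHit_m2, pvHit_m2a0, pvHit_m2a1, pvHit_m2a2, pvHit_m2a3, pvHit_m2a4, pvHit_m2a5, pvHit_m3, pvHit_m3a0, pvHit_m3a1, pvHit_m3a2, pvHit_m3a3, pvHit_m3a4, pvHit_m3a5, pvHit_m3a6, pvHit_m4, pvHit_m4a0, pvHit_m4a1]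
            · simp_all [PySem.List.enumerate, pvModules, pvMinByFst_filter_enum, List.find?_cons, List.find?_nil, List.any_cons, List.any_nil, pvHit_m0, pvHit_m0a0, pvHit_m1, pvHit_m1a0, pvHit_m1a1, pvHit_m1a2, pvHit_m1a3, pvHit_m1a4, pvHit_m2, pvHit_m2a0, pvHit_m2a1, pvHit_m2a2, pvHit_m2a3, pvHit_m2a4, pvHit_m2a5, pvHit_m3, pvHit_m3a0, pvHit_m3a1, pvHit_m3a2, pvHit_m3a3, pvHit_m3a4, pvHit_m3a5, pvHit_m3a6, pvHit_m4, pvHit_m4a0, pvHit_m4a1]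
          · simp_all [PySem.List.enumerate, pvModules, pvMinByFst_filter_enum, List.find?_cons, List.find?_nil, List.any_cons, List.any_nil, pvHit_m0, pvHit_m0a0, pvHit_m1, pvHit_m1a0, pvHit_m1a1, pvHit_m1a2, pvHit_m1a3, pvHit_m1a4, pvHit_m2, pvHit_m2a0, pvHit_m2a1, pvHit_m2a2, pvHit_m2a3, pvHit_m2a4, pvHit_m2a5, pvHit_m3, pvHit_m3a0, pvHit_m3a1, pvHit_m3a2, pvHit_m3a3, pvHit_m3a4, pvHit_m3a5, pvHit_m3a6, pvHit_m4, pvHit_m4a0, pvHit_m4a1]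
        · simp_all [PySem.List.enumerate, pvModules, pvMinByFst_filter_enum, List.find?_cons, List.find?_nil, List.any_cons, List.any_nil, pvHit_m0, pvHit_m0a0, pvHit_m1, pvHit_m1a0, pvHit_m1a1, pvHit_m1a2, pvHit_m1a3, pvHit_m1a4, pvHit_m2, pvHit_m2a0, pvHit_m2a1, pvHit_m2a2, pvHit_m2a3, pvHit_m2a4, pvHit_m2a5, pvHit_m3, pvHit_m3a0, pvHit_m3a1, pvHit_m3a2, pvHit_m3a3, pvHit_m3a4, pvHit_m3a5, pvHit_m3a6, pvHit_m4, pvHit_m4a0, pvHit_m4a1]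
      · simp_all [PySem.List.enumerate, pvModules, pvMinByFst_filter_enum, List.find?_cons, List.find?_nil, List.any_cons, List.any_nil, pvHit_m0, pvHit_m0a0, pvHit_m1, pvHit_m1a0, pvHit_m1a1, pvHit_m1a2, pvHit_m1a3, pvHit_m1a4, pvHit_m2, pvHit_m2a0, pvHit_m2a1, pvHit_m2a2, pvHit_m2a3, pvHit_m2a4, pvHit_m2a5, pvHit_m3, pvHit_m3a0, pvHit_m3a1, pvHit_m3a2, pvHit_m3a3, pvHit_m3a4, pvHit_m3a5, pvHit_m3a6, pvHit_m4, pvHit_m4a0, pvHit_m4a1]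
  · cases hd0 : (PySem.Str.isIn "check" lower || (PySem.Str.isIn "passed" lower || (PySem.Str.isIn "retry" lower || (PySem.Str.isIn "failed" lower))))
    · simp_all [PySem.List.enumerate, pvModules, pvMinByFst_filter_enum, List.find?_cons, List.find?_nil, List.any_cons, List.any_nil, pvHit_m0, pvHit_m0a0, pvHit_m1, pvHit_m1a0, pvHit_m1a1, pvHit_m1a2, pvHit_m1a3, pvHit_m1a4, pvHit_m2, pvHit_m2a0, pvHit_m2a1, pvHit_m2a2, pvHit_m2a3, pvHit_m2a4, pvHit_m2a5, pvHit_m3, pvHit_m3a0, pvHit_m3a1, pvHit_m3a2, pvHit_m3a3, pvHit_m3a4, pvHit_m3a5, pvHit_m3a6, pvHit_m4, pvHit_m4a0, pvHit_m4a1]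
    · simp_all [PySem.List.enumerate, pvModules, pvMinByFst_filter_enum, List.find?_cons, List.find?_nil, List.any_cons, List.any_nil, pvHit_m0, pvHit_m0a0, pvHit_m1, pvHit_m1a0, pvHit_m1a1, pvHit_m1a2, pvHit_m1a3, pvHit_m1a4, pvHit_m2, pvHit_m2a0, pvHit_m2a1, pvHit_m2a2, pvHit_m2a3, pvHit_m2a4, pvHit_m2a5, pvHit_m3, pvHit_m3a0, pvHit_m3a1, pvHit_m3a2, pvHit_m3a3, pvHit_m3a4, pvHit_m3a5, pvHit_m3a6, pvHit_m4, pvHit_m4a0, pvHit_m4a1]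

-- ===== VERDICT =====
theorem infer_log_module_action_py_spec : Claim_equal_infer_log_module_action_py := by
  intro message _
  unfold Spec_infer_log_module_action_py infer_log_module_action_py infer_log_module_action_py_alt
  rw [pv_or_empty, pvClassify_eq]
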